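-- pv_equiv track=rewrite | github.com/kjb4494/baekjoon | 2023/Silver/17413.py | solve
-- ===== SOURCE A (Python) =====
-- def solve(s):
--     current_word_start_index = 0
--     is_in_tag = False
--     for i in range(len(s)):
--         if s[i] == '<':
--             s = s[:current_word_start_index] + s[current_word_start_index:i][::-1] + s[i:]
--             current_word_start_index = i + 1
--             is_in_tag = True
--         elif s[i] == '>':
--             current_word_start_index = i + 1
--             is_in_tag = False
--         elif s[i] == ' ' and not is_in_tag:
--             s = s[:current_word_start_index] + s[current_word_start_index:i][::-1] + s[i:]
--             current_word_start_index = i + 1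
--         elif i == len(s) - 1 and not is_in_tag:
--             s = s[:current_word_start_index] + s[current_word_start_index:][::-1]
--     return s
-- ===== SOURCE B (Python) =====
-- def solve(s):
--     out = []
--     buf = []
--     is_in_tag = False
--     for c in s:
--         if c == '<':
--             buf.reverse()
--             out.extend(buf)
--             out.append(c)
--             buf = []
--             is_in_tag = True
--         elif c == '>':
--             out.extend(buf)
--             out.append(c)
--             buf = []
--             is_in_tag = False
--         elif c == ' ' and not is_in_tag:
--             buf.reverse()
--             out.extend(buf)
--             out.append(c)
--             buf = []
--         else:
--             buf.append(c)
--     if not is_in_tag: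
--         buf.reverse()
--     out.extend(buf)
--     return ''.join(out)
-- ===== Notes on version B (the rewrite author's own statement) =====
-- stated objective: faster
-- what changed: Replaced A's repeated whole-string slicing/reassembly at every word boundary (quadratic) with a single linear pass that buffers the current segment, flushes it reversed or unreversed at each tag delimiter, word boundary and end-of-string, and joins once.
import Mathlib
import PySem

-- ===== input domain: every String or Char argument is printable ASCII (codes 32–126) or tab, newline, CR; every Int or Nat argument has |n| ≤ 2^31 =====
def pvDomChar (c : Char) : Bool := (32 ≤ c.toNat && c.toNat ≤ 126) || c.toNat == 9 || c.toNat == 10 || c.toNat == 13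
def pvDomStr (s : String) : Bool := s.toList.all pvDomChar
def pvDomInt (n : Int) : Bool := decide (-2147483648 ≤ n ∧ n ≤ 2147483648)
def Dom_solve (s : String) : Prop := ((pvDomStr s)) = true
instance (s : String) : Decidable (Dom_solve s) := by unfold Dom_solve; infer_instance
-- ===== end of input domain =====

-- B replaces A's per-boundary whole-string slicing with one linear buffering pass (same output).
-- A only rebinds its local variable s (Python strings are immutable), so there are no side effects.

-- ===== PORT A =====
-- A's loop body: s = the (repeatedly rebuilt) string, start = current_word_start_index,
-- tag = is_in_tag; n = len of the original string (the rebuilt string always keeps this length,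
-- and every slice index here satisfies 0 ≤ start ≤ i ≤ n, so Python's s[:k], s[a:b], s[i:]
-- are exactly List.take k, (take b).drop a, drop i — exact on this index range).
def solveStep (n : Nat) (st : List Char × Nat × Bool) (i : Nat) : List Char × Nat × Bool :=
  let s := st.1
  let start := st.2.1
  let tag := st.2.2
  match s[i]? with
  | none => st  -- unreachable: i < n = s.length throughout
  | some c =>
    if c = '<' then
      (s.take start ++ ((s.take i).drop start).reverse ++ s.drop i, i + 1, true)
    else if c = '>' then
      (s, i + 1, false)
    else if c = ' ' ∧ tag = false then
      (s.take start ++ ((s.take i).drop start).reverse ++ s.drop i, i + 1, tag)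
    else if i = n - 1 ∧ tag = false then
      (s.take start ++ (s.drop start).reverse, start, tag)
    else st

def solve (s : String) : String :=
  let l := s.toList
  let n := l.length
  String.ofList (((List.range n).foldl (solveStep n) (l, 0, false)).1)

-- ===== PORT B =====
-- state = (out, buf, is_in_tag); flush buf (reversed or not) at each delimiter, once more at the end.
def altStep (st : List Char × List Char × Bool) (c : Char) : List Char × List Char × Bool :=
  let out := st.1
  let buf := st.2.1
  let tag := st.2.2
  if c = '<' then (out ++ buf.reverse ++ [c], [], true)
  else if c = '>' then (out ++ buf ++ [c], [], false)
  else if c = ' ' ∧ tag = false then (out ++ buf.reverse ++ [c], [], false)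
  else (out, buf ++ [c], tag)

def solve_alt (s : String) : String :=
  let st := s.toList.foldl altStep ([], [], false)
  String.ofList (st.1 ++ (if st.2.2 then st.2.1 else st.2.1.reverse))

-- ===== PRECONDITION & SPEC =====
def Spec_solve (s : String) (out : String) : Prop := out = solve_alt s
instance (s : String) (out : String) : Decidable (Spec_solve s out) := by unfold Spec_solve; infer_instance

-- ===== CLAIM (what is proved, stated in full; the proofs are below) =====
def Claim_equal_solve : Prop := ∀ (s : String), Dom_solve s → Spec_solve s (solve s)

-- ===== LEMMAS AND PROOFS =====

-- A's state after j iterations / B's state after consuming j characters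
def foldA (l : List Char) (j : Nat) : List Char × Nat × Bool :=
  (List.range j).foldl (solveStep l.length) (l, 0, false)

def foldB (l : List Char) (j : Nat) : List Char × List Char × Bool :=
  (l.take j).foldl altStep ([], [], false)

-- the loop invariant: A's string is B's flushed output followed by the untouched
-- original suffix, A's word start = length of B's output, B's buffer = the original
-- characters between the word start and the cursor, and the tag flags agree.
def pvRel (l : List Char) (j : Nat) (a : List Char × Nat × Bool)
    (b : List Char × List Char × Bool) : Prop :=
  a.1 = b.1 ++ l.drop a.2.1 ∧ a.2.1 = b.1.length ∧ a.2.1 ≤ j ∧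
  b.2.1 = (l.take j).drop a.2.1 ∧ a.2.2 = b.2.2

def AInv (l : List Char) (j : Nat) : Prop := pvRel l j (foldA l j) (foldB l j)

-- facts about A's string s = out ++ l.drop out.length (k := out.length)
theorem fget (out l : List Char) (j : Nat) (h3 : out.length ≤ j) (hj : j < l.length) :
    (out ++ l.drop out.length)[j]? = some (l[j]) := by
  rw [List.getElem?_append_right h3, List.getElem?_drop]
  have : out.length + (j - out.length) = j := by omega
  rw [this, List.getElem?_eq_getElem hj]

theorem fpre (out l : List Char) : (out ++ l.drop out.length).take out.length = out := by
  simp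

theorem fdrop (out l : List Char) :
    (out ++ l.drop out.length).drop out.length = l.drop out.length := by
  simp

theorem fmid (out l : List Char) (j : Nat) (h3 : out.length ≤ j) :
    ((out ++ l.drop out.length).take j).drop out.length = (l.take j).drop out.length := by
  rw [List.take_append, List.take_of_length_le h3, List.drop_append,
    List.drop_of_length_le (le_refl _), Nat.sub_self, List.drop_zero, List.nil_append,
    List.drop_take]

theorem fsuf (out l : List Char) (j : Nat) (h3 : out.length ≤ j) :
    (out ++ l.drop out.length).drop j = l.drop j := by
  rw [List.drop_append, List.drop_of_length_le h3, List.nil_append, List.drop_drop]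
  congr 1
  omega

theorem fbuf (l : List Char) (k j : Nat) (h3 : k ≤ j) (hj : j < l.length) :
    (l.take (j + 1)).drop k = (l.take j).drop k ++ [l[j]] := by
  rw [List.take_succ, List.getElem?_eq_getElem hj, List.drop_append]
  have h1 : k - min j l.length = 0 := by omega
  simp [h1]

theorem fsplit (l : List Char) (k j : Nat) (h3 : k ≤ j) (hjl : j ≤ l.length) :
    l.drop k = (l.take j).drop k ++ l.drop j := by
  conv_lhs => rw [← List.take_append_drop j l]
  rw [List.drop_append]
  have h1 : k - min j l.length = 0 := by omega
  simp [h1]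

theorem fcons (l : List Char) (j : Nat) (hj : j < l.length) :
    l.drop j = l[j] :: l.drop (j + 1) := List.drop_eq_getElem_cons hj

-- a run of A's loop body, away from the last index, preserves pvRel
theorem step_rel (l : List Char) (j : Nat) (hj : j + 1 < l.length)
    (out buf : List Char) (t : Bool)
    (h3 : out.length ≤ j) (h4 : buf = (l.take j).drop out.length) :
    pvRel l (j + 1) (solveStep l.length (out ++ l.drop out.length, out.length, t) j)
      (altStep (out, buf, t) l[j]) := by
  have hjlt : j < l.length := by omega
  have hne : ¬ (j = l.length - 1 ∧ t = false) := by
    rintro ⟨h, -⟩; omega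
  have hlbuf : buf.length = j - out.length := by
    simp [h4, List.length_take]; omega
  have hnil : (l.take (j + 1)).drop (j + 1) = [] :=
    List.drop_eq_nil_of_le (by simp [List.length_take])
  unfold solveStep altStep
  simp only [fget out l j h3 hjlt]
  by_cases hc1 : l[j] = '<'
  · simp only [if_pos hc1]
    unfold pvRel
    dsimp only
    refine ⟨?_, ?_, le_refl _, hnil.symm, rfl⟩
    · rw [fpre, fmid out l j h3, fsuf out l j h3, fcons l j hjlt, h4]
      simp
    · simp [hlbuf]; omega
  · by_cases hc2 : l[j] = '>'
    · simp only [if_neg hc1, if_pos hc2]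
      unfold pvRel
      dsimp only
      refine ⟨?_, ?_, le_refl _, hnil.symm, rfl⟩
      · rw [fsplit l out.length (j + 1) (by omega) (by omega),
          fbuf l out.length j h3 hjlt, h4]
        simp
      · simp [hlbuf]; omega
    · by_cases hc3 : l[j] = ' ' ∧ t = false
      · simp only [if_neg hc1, if_neg hc2, if_pos hc3]
        unfold pvRel
        dsimp only
        refine ⟨?_, ?_, le_refl _, hnil.symm, hc3.2⟩
        · rw [fpre, fmid out l j h3, fsuf out l j h3, fcons l j hjlt, h4]
          simp
        · simp [hlbuf]; omega
      · simp only [if_neg hc1, if_neg hc2, if_neg hc3, if_neg hne]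
        unfold pvRel
        dsimp only
        exact ⟨rfl, rfl, by omega, by rw [fbuf l out.length j h3 hjlt, h4], rfl⟩

-- the last iteration of A's loop followed by B's final flush yields equal strings
theorem last_rel (l : List Char) (j : Nat) (hj : j + 1 = l.length)
    (out buf : List Char) (t : Bool)
    (h3 : out.length ≤ j) (h4 : buf = (l.take j).drop out.length) :
    (solveStep l.length (out ++ l.drop out.length, out.length, t) j).1 =
      (altStep (out, buf, t) l[j]).1 ++
        (if (altStep (out, buf, t) l[j]).2.2 then (altStep (out, buf, t) l[j]).2.1
         else (altStep (out, buf, t) l[j]).2.1.reverse) := by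
  have hjlt : j < l.length := by omega
  have hdropj : l.drop j = [l[j]] := by
    rw [fcons l j hjlt, List.drop_of_length_le (by omega)]
  unfold solveStep altStep
  simp only [fget out l j h3 hjlt]
  by_cases hc1 : l[j] = '<'
  · simp only [if_pos hc1]
    rw [fpre, fmid out l j h3, fsuf out l j h3, hdropj, h4]
    simp
  · by_cases hc2 : l[j] = '>'
    · simp only [if_neg hc1, if_pos hc2]
      rw [fsplit l out.length j h3 (by omega), hdropj, h4]
      simp
    · by_cases hc3 : l[j] = ' ' ∧ t = false
      · simp only [if_neg hc1, if_neg hc2, if_pos hc3]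
        obtain ⟨-, ht⟩ := hc3
        subst ht
        rw [fpre, fmid out l j h3, fsuf out l j h3, hdropj, h4]
        simp
      · by_cases hc4 : j = l.length - 1 ∧ t = false
        · simp only [if_neg hc1, if_neg hc2, if_neg hc3, if_pos hc4]
          obtain ⟨-, ht⟩ := hc4
          subst ht
          rw [fpre, fdrop]
          have : l.drop out.length = buf ++ [l[j]] := by
            rw [fsplit l out.length j h3 (by omega), hdropj, h4]
          simp [this]
        · simp only [if_neg hc1, if_neg hc2, if_neg hc3, if_neg hc4]
          have ht : t = true := by
            rcases t with _ | _
            · exact absurd ⟨by omega, rfl⟩ hc4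
            · rfl
          subst ht
          rw [fsplit l out.length (j + 1) (by omega) (by omega),
            fbuf l out.length j h3 hjlt, h4, hj, List.drop_length]
          simp

theorem pv_inv_zero (l : List Char) : AInv l 0 := by
  unfold AInv foldA foldB pvRel
  simp

theorem pv_inv_step (l : List Char) (j : Nat) (hj : j + 1 < l.length) (h : AInv l j) :
    AInv l (j + 1) := by
  unfold AInv foldA foldB at h ⊢
  obtain ⟨h1, h2, h3, h4, h5⟩ := h
  rw [List.range_succ, List.foldl_append, List.foldl_cons, List.foldl_nil]
  rw [List.take_succ, List.getElem?_eq_getElem (by omega : j < l.length),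
    Option.toList_some, List.foldl_append, List.foldl_cons, List.foldl_nil]
  have ha : (List.range j).foldl (solveStep l.length) (l, 0, false) =
      (((l.take j).foldl altStep ([], [], false)).1 ++
        l.drop (((l.take j).foldl altStep ([], [], false)).1).length,
       (((l.take j).foldl altStep ([], [], false)).1).length,
       ((l.take j).foldl altStep ([], [], false)).2.2) := by
    ext1
    · rw [h1, h2]
    · ext1
      · exact h2
      · exact h5
  have hb : (l.take j).foldl altStep ([], [], false) =
      ((((l.take j).foldl altStep ([], [], false)).1),
       (((l.take j).foldl altStep ([], [], false)).2.1),
       (((l.take j).foldl altStep ([], [], false)).2.2)) := rfl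
  rw [ha]
  conv_rhs => rw [hb]
  exact step_rel l j hj _ _ _ (by rw [← h2]; exact h3) (by rw [h4, h2])

theorem pv_inv_all (l : List Char) (j : Nat) (hj : j + 1 ≤ l.length) : AInv l j := by
  induction j with
  | zero => exact pv_inv_zero l
  | succ j ih => exact pv_inv_step l j hj (ih (by omega))

theorem main_eq (l : List Char) :
    ((List.range l.length).foldl (solveStep l.length) (l, 0, false)).1 =
      (l.foldl altStep ([], [], false)).1 ++
        (if (l.foldl altStep ([], [], false)).2.2 then (l.foldl altStep ([], [], false)).2.1
         else (l.foldl altStep ([], [], false)).2.1.reverse) := by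
  rcases l with _ | ⟨c, l'⟩
  · simp
  · set l := c :: l' with hl
    have hlen : l.length = l'.length + 1 := by simp [hl]
    obtain ⟨h1, h2, h3, h4, h5⟩ := pv_inv_all l l'.length (by omega)
    have hrange : List.range l.length = List.range l'.length ++ [l'.length] := by
      rw [hlen, List.range_succ]
    have hfull : l = l.take l'.length ++ [l[l'.length]'(by omega)] := by
      conv_lhs => rw [← List.take_append_drop l'.length l]
      congr 1
      rw [List.drop_eq_getElem_cons (by omega), List.drop_of_length_le (by omega)]
    rw [hrange, List.foldl_append, List.foldl_cons, List.foldl_nil]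
    conv_rhs => rw [hfull, List.foldl_append, List.foldl_cons, List.foldl_nil]
    unfold foldA at h1 h2 h3 h4 h5
    unfold foldB at h1 h2 h4 h5
    have ha : (List.range l'.length).foldl (solveStep l.length) (l, 0, false) =
        (((l.take l'.length).foldl altStep ([], [], false)).1 ++
          l.drop (((l.take l'.length).foldl altStep ([], [], false)).1).length,
         (((l.take l'.length).foldl altStep ([], [], false)).1).length,
         ((l.take l'.length).foldl altStep ([], [], false)).2.2) := by
      ext1
      · rw [h1, h2]
      · ext1
        · exact h2
        · exact h5
    rw [ha]
    exact last_rel l l'.length (by omega) _ _ _ (by rw [← h2]; exact h3) (by rw [h4, h2])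

-- ===== VERDICT (by name: the statement is the Claim_ definition above) =====
theorem solve_spec : Claim_equal_solve := by
  intro s _
  unfold Spec_solve solve solve_alt
  have := main_eq s.toList
  simp only [this]
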